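-- pv_equiv track=rewrite | github.com/Jeremy0818/dev-outreach-python-sort-lab | SortComparator/SortComparator/QuickBestCase.py | generate
-- ===== SOURCE A (Python) =====
-- def generate(my_list, begin, end):
--     count = end - begin
--     if count < 3:
--         return my_list
--     else:
--         # Find a middle element index
--         # This will be the pivot element for the part of the list [begin; end)
--         middle = begin + int((count - 1) / 2)
--         # Make the left part best-case first: [begin; middle)
--         my_list = generate(my_list, begin, middle)
--         # Swap the pivot and the start element
--         temp = my_list[begin]
--         my_list[begin] =  my_list[middle]
--         my_list[middle] = temp
--         # Make the right part best-case, too: (middle; end)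
--         middle += 1
--         my_list = generate(my_list, middle, end)
--         return my_list
-- ===== SOURCE B (Python) =====
-- def generate(my_list, begin, end):
--     # Two-phase: build the in-order swap schedule with an explicit stack, then apply it.
--     schedule = []
--     stack = [(begin, end, True)]
--     while stack:
--         b, e, expand = stack.pop()
--         if expand:
--             if e - b >= 3:
--                 m = b + (e - b - 1) // 2
--                 stack.append((m + 1, e, True))
--                 stack.append((b, m, False))
--                 stack.append((b, m, True))
--         else:
--             schedule.append((b, e))  # e holds the middle index here
--     for i, j in schedule:
--         my_list[i], my_list[j] = my_list[j], my_list[i]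
--     return my_list
-- ===== Notes on version B (the rewrite author's own statement) =====
-- stated objective: alternative
-- what changed: Replaces A's in-order recursion that interleaves swaps with recursive calls by a two-phase iterative version: an explicit stack of expand/emit frames builds the swap schedule, which is then applied to the list in one pass.
-- outside the precondition, e.g. on generate([1, 2, 3], 0, 5): A returns [3, 2, 1], B returns [3, 2, 1]
import Mathlib
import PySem

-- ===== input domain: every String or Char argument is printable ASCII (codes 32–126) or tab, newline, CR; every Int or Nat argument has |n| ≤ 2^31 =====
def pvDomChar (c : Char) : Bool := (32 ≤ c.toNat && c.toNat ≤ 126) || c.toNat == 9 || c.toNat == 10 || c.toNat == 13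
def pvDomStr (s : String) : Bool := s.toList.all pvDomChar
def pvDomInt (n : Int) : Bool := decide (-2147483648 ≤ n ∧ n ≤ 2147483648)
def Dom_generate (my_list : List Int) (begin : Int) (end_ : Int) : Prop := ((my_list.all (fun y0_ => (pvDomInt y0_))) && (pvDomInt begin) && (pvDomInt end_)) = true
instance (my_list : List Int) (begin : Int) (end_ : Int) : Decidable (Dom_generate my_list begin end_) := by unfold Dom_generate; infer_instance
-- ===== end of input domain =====

-- B replaces A's in-order recursion (which interleaves swaps with recursive calls) by a two-phase
-- explicit-stack version: build the swap schedule iteratively, then apply it in one pass; same cost,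
-- same in-place mutation of the argument list as A (equivalence proved about the return value).


-- ===== PORT A =====
-- temp = l[begin]; l[begin] = l[middle]; l[middle] = temp   (indices in range under Pre_)
def pySwapA (l : List Int) (i j : Int) : List Int :=
  let temp := PySem.List.pyGetD l i 0
  let l1 := PySem.List.pySetD l i (PySem.List.pyGetD l j 0)
  PySem.List.pySetD l1 j temp

-- A's recursion, with a Nat fuel as totality guard ((end-begin).toNat always suffices: each
-- recursive call strictly shrinks the window, so the window size bounds the depth)
def generateF : Nat → List Int → Int → Int → List Int
  | 0, l, _, _ => l
  | f + 1, l, b, e =>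
    if e - b < 3 then l
    else
      let m := b + (e - b - 1) / 2
      let l1 := generateF f l b m
      let l2 := pySwapA l1 b m
      generateF f l2 (m + 1) e

def generate (my_list : List Int) (begin : Int) (end_ : Int) : List Int :=
  generateF (end_ - begin).toNat my_list begin end_

-- ===== PORT B =====
-- l[i], l[j] = l[j], l[i]
def pySwapB (l : List Int) (i j : Int) : List Int :=
  let a := PySem.List.pyGetD l j 0
  let b := PySem.List.pyGetD l i 0
  PySem.List.pySetD (PySem.List.pySetD l i a) j b

-- the while-loop over the explicit stack, accumulating the swap schedule (fuel as totality guard)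
def schedLoopF : Nat → List (Int × Int × Bool) → List (Int × Int) → List (Int × Int)
  | 0, _, acc => acc
  | f + 1, stack, acc =>
    match stack with
    | [] => acc
    | (b, e, true) :: rest =>
      if 3 ≤ e - b then
        let m := b + (e - b - 1) / 2
        schedLoopF f ((b, m, true) :: (b, m, false) :: (m + 1, e, true) :: rest) acc
      else schedLoopF f rest acc
    | (b, e, false) :: rest => schedLoopF f rest (acc ++ [(b, e)])

def generate_alt (my_list : List Int) (begin : Int) (end_ : Int) : List Int :=
  let schedule := schedLoopF (3 * (end_ - begin).toNat + 2) [(begin, end_, true)] []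
  schedule.foldl (fun l p => pySwapB l p.1 p.2) my_list

-- ===== PRECONDITION & SPEC =====
-- Pre_ excludes index windows reaching beyond the list's valid (possibly negative) Python index
-- range, where A as a rule raises IndexError; on the few such windows whose out-of-range slots are
-- never actually touched A returns a value, and B returns the same value there.
def Pre_generate (my_list : List Int) (begin : Int) (end_ : Int) : Prop :=
  end_ - begin < 3 ∨ (-(my_list.length : Int) ≤ begin ∧ end_ ≤ my_list.length)
instance (my_list : List Int) (begin : Int) (end_ : Int) : Decidable (Pre_generate my_list begin end_) := by unfold Pre_generate; infer_instance
def pvWitness_generate : List Int × Int × Int := ([3, 1, 2, 4, 5], 0, 5)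

def Spec_generate (my_list : List Int) (begin : Int) (end_ : Int) (out : List Int) : Prop := out = generate_alt my_list begin end_
instance (my_list : List Int) (begin : Int) (end_ : Int) (out : List Int) : Decidable (Spec_generate my_list begin end_ out) := by unfold Spec_generate; infer_instance

-- ===== CLAIM (what is proved, stated in full; the proofs are below) =====
def Claim_equal_generate : Prop := ∀ (my_list : List Int) (begin : Int) (end_ : Int), Dom_generate my_list begin end_ → Pre_generate my_list begin end_ → Spec_generate my_list begin end_ (generate my_list begin end_)

-- ===== LEMMAS AND PROOFS =====

-- weight of a stack frame (each loop iteration lowers the total weight by at least 1,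
-- so the initial total weight bounds the number of iterations and serves as fuel)
def frameW (f : Int × Int × Bool) : Nat :=
  if f.2.2 then 3 * (f.2.1 - f.1).toNat + 1 else 1

-- proof-side recursive description of the swap schedule
def swapsRec (b e : Int) : List (Int × Int) :=
  if e - b < 3 then []
  else
    let m := b + (e - b - 1) / 2
    swapsRec b m ++ [(b, m)] ++ swapsRec (m + 1) e
termination_by (e - b).toNat
decreasing_by all_goals omega

-- proof-side well-founded version of B's while-loop
def schedRec (stack : List (Int × Int × Bool)) (acc : List (Int × Int)) : List (Int × Int) :=
  match stack with
  | [] => acc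
  | (b, e, true) :: rest =>
    if 3 ≤ e - b then
      let m := b + (e - b - 1) / 2
      schedRec ((b, m, true) :: (b, m, false) :: (m + 1, e, true) :: rest) acc
    else schedRec rest acc
  | (b, e, false) :: rest => schedRec rest (acc ++ [(b, e)])
termination_by (stack.map frameW).sum
decreasing_by
  all_goals simp [frameW]
  all_goals omega

-- enough fuel makes the fueled loop agree with the well-founded one
theorem schedF_eq (f : Nat) : ∀ (stack : List (Int × Int × Bool)) (acc : List (Int × Int)),
    (stack.map frameW).sum ≤ f → schedLoopF f stack acc = schedRec stack acc := by
  induction f with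
  | zero =>
    intro stack acc h
    match stack with
    | [] => rw [schedLoopF, schedRec]
    | (b, e, expand) :: rest =>
      exfalso
      have : 1 ≤ frameW (b, e, expand) := by unfold frameW; split <;> omega
      simp [List.map, List.sum_cons] at h
      omega
  | succ f ih =>
    intro stack acc h
    match stack with
    | [] => rw [schedLoopF, schedRec]
    | (b, e, true) :: rest =>
      rw [schedLoopF, schedRec]
      by_cases hc : 3 ≤ e - b
      · simp only [hc, if_pos]
        apply ih
        simp [frameW] at h ⊢
        omega
      · simp only [hc, if_neg, not_false_iff]
        apply ih
        simp [frameW] at h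
        omega
    | (b, e, false) :: rest =>
      rw [schedLoopF, schedRec]
      apply ih
      simp [frameW] at h
      omega

-- processing a pushed range frame appends exactly that range's schedule
theorem sched_push (n : Nat) : ∀ (b e : Int), (e - b).toNat = n →
    ∀ (rest : List (Int × Int × Bool)) (acc : List (Int × Int)),
      schedRec ((b, e, true) :: rest) acc = schedRec rest (acc ++ swapsRec b e) := by
  induction n using Nat.strong_induction_on with
  | _ n ih =>
    intro b e hn rest acc
    by_cases h : e - b < 3
    · rw [schedRec, swapsRec]
      simp [show ¬ 3 ≤ e - b by omega, h]
    · rw [schedRec, swapsRec]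
      simp only [show (3 : Int) ≤ e - b by omega, h, if_neg, not_false_iff]
      rw [ih ((b + (e - b - 1) / 2) - b).toNat (by omega) b (b + (e - b - 1) / 2) rfl]
      rw [schedRec]
      rw [ih (e - (b + (e - b - 1) / 2 + 1)).toNat (by omega) (b + (e - b - 1) / 2 + 1) e rfl]
      simp [List.append_assoc]

theorem swapA_eq_swapB (l : List Int) (i j : Int) : pySwapA l i j = pySwapB l i j := rfl

-- with enough fuel, A's recursion applies exactly the schedule swapsRec b e, left to right
theorem genF_fold (f : Nat) : ∀ (b e : Int), (e - b).toNat ≤ f → ∀ (l : List Int),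
    generateF f l b e = (swapsRec b e).foldl (fun l p => pySwapB l p.1 p.2) l := by
  induction f with
  | zero =>
    intro b e hf l
    rw [generateF, swapsRec]
    simp [show e - b < 3 by omega]
  | succ f ih =>
    intro b e hf l
    by_cases h : e - b < 3
    · rw [generateF, swapsRec]; simp [h]
    · rw [generateF, swapsRec]
      simp only [h, if_neg, not_false_iff]
      rw [List.foldl_append, List.foldl_append]
      rw [← ih b (b + (e - b - 1) / 2) (by omega) l]
      simp [List.foldl, swapA_eq_swapB]
      rw [ih (b + (e - b - 1) / 2 + 1) e (by omega)]

-- ===== VERDICT (by name: the statement is the Claim_ definition above) =====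
theorem generate_spec : Claim_equal_generate := by
  intro my_list b e _ _
  unfold Spec_generate generate generate_alt
  rw [schedF_eq (3 * (e - b).toNat + 2) [(b, e, true)] []
      (by simp [List.map, frameW])]
  rw [sched_push (e - b).toNat b e rfl [] []]
  rw [schedRec]
  simp [genF_fold (e - b).toNat b e (le_refl _) my_list]
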